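-- pv_equiv track=rewrite | github.com/Shreyas-21/stegtool | stegtool.py | get_payload_bits
-- ===== SOURCE A (Python) =====
-- def get_payload_bits(payload_bytes):
-- 	"""Return a list of bits from a list of bytes
--
-- 	Keyword arguments:
-- 	payload_bytes -- a list of bytes"""
--
-- 	payload_bits = list()
-- 	#convert each byte to a sequence of bits
-- 	for byte in payload_bytes:
-- 		temp = list()
-- 		for i in range(8):
-- 			temp.append(byte >> i & 1)
-- 		#temp has the bits in reversed order
-- 		payload_bits.extend(temp[::-1])
-- 	return payload_bits
-- ===== SOURCE B (Python) =====
-- def get_payload_bits(payload_bytes):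
-- 	"""Return a list of bits from a list of bytes (MSB-first, 8 per byte)."""
-- 	return [int(c) for byte in payload_bytes for c in format(byte & 0xFF, '08b')]
-- ===== Notes on version B (the rewrite author's own statement) =====
-- stated objective: idiomatic
-- what changed: Replaces the nested shift-and-mask loop with temp list and reversal by a single flattening comprehension that formats each byte's low 8 bits as an '08b' string and maps its characters to ints.
import Mathlib
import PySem

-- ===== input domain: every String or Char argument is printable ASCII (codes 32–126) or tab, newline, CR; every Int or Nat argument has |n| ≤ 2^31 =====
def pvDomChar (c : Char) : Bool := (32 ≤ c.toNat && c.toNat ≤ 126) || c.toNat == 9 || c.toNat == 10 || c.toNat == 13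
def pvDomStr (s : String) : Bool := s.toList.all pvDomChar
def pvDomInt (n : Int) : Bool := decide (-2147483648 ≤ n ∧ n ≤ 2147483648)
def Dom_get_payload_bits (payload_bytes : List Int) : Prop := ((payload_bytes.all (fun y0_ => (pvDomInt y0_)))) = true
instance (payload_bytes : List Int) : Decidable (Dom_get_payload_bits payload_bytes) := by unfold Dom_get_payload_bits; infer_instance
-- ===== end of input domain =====

-- B replaces A's shift-and-mask inner loop (temp list + reversal) by formatting each
-- byte's low 8 bits as an '08b' string and mapping its digit characters to ints (idiomatic, same cost).

-- ===== PORT A =====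
def get_payload_bits (payload_bytes : List Int) : List Int :=
  payload_bytes.foldl
    (fun payload_bits (byte : Int) =>
      -- inner loop: temp.append(byte >> i & 1) for i in range(8); then extend with temp[::-1]
      payload_bits ++
        ((List.range 8).foldl (fun temp (i : Nat) => temp ++ [PySem.Int.band (byte >>> i) 1]) []).reverse)
    []

-- ===== PORT B =====
-- format(n, '08b') for n ≥ 0: the binary digits of n (format(n,'b') = PySem.Int.toBinChars n),
-- zero-padded on the left to width 8; int(c) on a binary-digit char is its code minus 48.
def pvByteBitsB (byte : Int) : List Int :=
  let ds := PySem.Int.toBinChars (PySem.Int.band byte 255)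
  (List.replicate (8 - ds.length) '0' ++ ds).map (fun c => ((c.toNat : Int) - 48))

def get_payload_bits_alt (payload_bytes : List Int) : List Int :=
  payload_bytes.flatMap pvByteBitsB

-- ===== PRECONDITION & SPEC =====
def Spec_get_payload_bits (payload_bytes : List Int) (out : List Int) : Prop := out = get_payload_bits_alt payload_bytes
instance (payload_bytes : List Int) (out : List Int) : Decidable (Spec_get_payload_bits payload_bytes out) := by unfold Spec_get_payload_bits; infer_instance

-- ===== CLAIM (what is proved, stated in full; the proofs are below) =====
def Claim_equal_get_payload_bits : Prop := ∀ (payload_bytes : List Int), Dom_get_payload_bits payload_bytes → Spec_get_payload_bits payload_bytes (get_payload_bits payload_bytes)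

-- ===== LEMMAS AND PROOFS =====

theorem pv_band255 (b : Int) : PySem.Int.band b 255 = b % 256 := by
  simp [PySem.Int.band]
  have h1 : b.toNat &&& 255 = b.toNat % 256 := by
    simpa using Nat.and_two_pow_sub_one_eq_mod b.toNat 8
  have h2 : 255 &&& ((-b).toNat - 1) = ((-b).toNat - 1) % 256 := by
    simpa [Nat.land_comm] using Nat.and_two_pow_sub_one_eq_mod ((-b).toNat - 1) 8
  rw [h1, h2]; split_ifs <;> omega

theorem pv_band1 (x : Int) : PySem.Int.band x 1 = x % 2 := by
  simp [PySem.Int.band]; split_ifs <;> omega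

-- each of A's bits reads only the low 8 bits of the byte
theorem pv_bit (b : Int) : ∀ i : Nat, i < 8 →
    PySem.Int.band (b >>> i) 1 = ((b % 256) / ((2:Int)^i)) % 2 := by
  intro i h
  rw [Int.shiftRight_eq_div_pow, pv_band1]
  interval_cases i <;> push_cast <;> omega

-- B's per-byte value on each residue 0 ≤ k < 256, written as the 8 MSB-first bits
theorem pv_bbits_fin : ∀ k : Nat, k < 256 →
    pvByteBitsB (k : Int) = [((k:Int)/128)%2, ((k:Int)/64)%2, ((k:Int)/32)%2, ((k:Int)/16)%2,
                             ((k:Int)/8)%2, ((k:Int)/4)%2, ((k:Int)/2)%2, (k:Int)%2] := by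
  set_option maxRecDepth 10000 in decide

-- A's inner loop produces exactly B's per-byte list
theorem pv_perByte (b : Int) :
    ((List.range 8).foldl (fun temp (i : Nat) => temp ++ [PySem.Int.band (b >>> i) 1]) []).reverse
      = pvByteBitsB b := by
  have hA : ((List.range 8).foldl (fun temp (i : Nat) => temp ++ [PySem.Int.band (b >>> i) 1]) []).reverse
      = (([7,6,5,4,3,2,1] : List Nat)).map (fun i : Nat => PySem.Int.band (b >>> i) 1)
        ++ [PySem.Int.band b 1] := by
    rw [PySem.List.foldl_append_eq_flatMap (fun i : Nat => [PySem.Int.band (b >>> i) 1])]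
    simp [List.range_succ]
  have hBmod : pvByteBitsB b = pvByteBitsB (b % 256) := by
    unfold pvByteBitsB
    rw [pv_band255, pv_band255, Int.emod_emod_of_dvd b (by norm_num)]
  have hk : ∃ k : Nat, (k : Int) = b % 256 ∧ k < 256 := by
    refine ⟨(b % 256).toNat, ?_, ?_⟩ <;> omega
  obtain ⟨k, hkeq, hklt⟩ := hk
  rw [hA, hBmod, ← hkeq, pv_bbits_fin k hklt, hkeq]
  simp only [List.map_cons, List.map_nil, List.cons_append, List.nil_append]
  rw [pv_bit b 7 (by omega), pv_bit b 6 (by omega), pv_bit b 5 (by omega), pv_bit b 4 (by omega),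
      pv_bit b 3 (by omega), pv_bit b 2 (by omega), pv_bit b 1 (by omega), pv_band1 b]
  norm_num

-- ===== VERDICT (by name: the statement is the Claim_ definition above) =====
theorem get_payload_bits_spec : Claim_equal_get_payload_bits := by
  intro payload_bytes _
  unfold Spec_get_payload_bits get_payload_bits get_payload_bits_alt
  rw [PySem.List.foldl_append_eq_flatMap, List.nil_append]
  exact List.flatMap_congr (fun b _ => pv_perByte b)
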